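-- pv_equiv track=rewrite | github.com/BezarHere/GPort | utf8_lookup_gen.py | char_len
-- ===== SOURCE A (Python) =====
-- def char_len(byte: int):
-- 	if byte < (3 << 6):
-- 		return 1
-- 	b = bin(byte)[2:]
-- 	if len(b) < 8:
-- 		b = '0' * (8 - len(b)) + b
-- 	x = 0
-- 	for i in b:
-- 		if i == '1':
-- 			x += 1
-- 			continue
-- 		break
-- 	return x
-- ===== SOURCE B (Python) =====
-- def char_len(byte: int):
--     if byte < (3 << 6):
--         return 1
--     L = byte.bit_length()
--     m = ((1 << L) - 1) - byte
--     return L - m.bit_length()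
-- ===== Notes on version B (the rewrite author's own statement) =====
-- stated objective: alternative
-- what changed: Replaces the binary-string construction, zero-padding and leading-character loop with a closed-form bit computation: L = bit_length, and the leading-ones count is L minus the bit_length of the masked complement (2^L - 1) - byte.
import Mathlib
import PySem

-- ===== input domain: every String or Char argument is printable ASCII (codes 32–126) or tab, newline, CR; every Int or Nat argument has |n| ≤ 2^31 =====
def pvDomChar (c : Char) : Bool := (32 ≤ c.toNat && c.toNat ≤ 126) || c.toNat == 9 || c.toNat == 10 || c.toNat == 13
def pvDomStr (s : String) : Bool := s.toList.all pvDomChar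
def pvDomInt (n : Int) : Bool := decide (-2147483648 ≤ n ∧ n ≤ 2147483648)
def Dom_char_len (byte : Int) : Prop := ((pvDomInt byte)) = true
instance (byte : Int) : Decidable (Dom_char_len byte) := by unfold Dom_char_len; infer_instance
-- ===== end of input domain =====

-- B replaces A's binary-string build, zero-padding and leading-'1' scan by a closed-form
-- bit computation (L = bit_length, answer = L - bit_length(2^L - 1 - byte)); objective: alternative.

-- ===== PORT A =====
-- `bin(n)[2:]` for n > 0: the binary digits of n, most significant first (exact for n ≥ 1)
def pvBinAux (n : Nat) : List Char :=
  if _h : n = 0 then [] else pvBinAux (n / 2) ++ [if n % 2 = 1 then '1' else '0']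
decreasing_by exact Nat.div_lt_self (Nat.pos_of_ne_zero ‹_›) one_lt_two

-- Python's `x = 0; for i in b: if i == '1': x += 1; continue; break`
def pvLeadLoop : List Char → Int → Int
  | [], x => x
  | c :: rest, x => if c = '1' then pvLeadLoop rest (x + 1) else x

def char_len (byte : Int) : Int :=
  if byte < (3 <<< 6 : Int) then 1
  else
    let b := pvBinAux byte.toNat
    let b := if b.length < 8 then List.replicate (8 - b.length) '0' ++ b else b
    pvLeadLoop b 0

-- ===== PORT B =====
-- Python `int.bit_length` for a nonnegative argument
def pvBitLen (n : Nat) : Nat := if n = 0 then 0 else Nat.log2 n + 1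

def char_len_alt (byte : Int) : Int :=
  if byte < (3 <<< 6 : Int) then 1
  else
    let L := pvBitLen byte.toNat
    let m := ((2 ^ L : Int) - 1) - byte
    (L : Int) - pvBitLen m.toNat

-- ===== PRECONDITION & SPEC =====
def Spec_char_len (byte : Int) (out : Int) : Prop := out = char_len_alt byte
instance (byte : Int) (out : Int) : Decidable (Spec_char_len byte out) := by unfold Spec_char_len; infer_instance

-- ===== CLAIM (what is proved, stated in full; the proofs are below) =====
def Claim_equal_char_len : Prop := ∀ (byte : Int), Dom_char_len byte → Spec_char_len byte (char_len byte)

-- ===== LEMMAS AND PROOFS =====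

/-- Pure count of leading `'1'` characters. -/
def pvCountLead : List Char → Nat
  | [] => 0
  | c :: rest => if c = '1' then pvCountLead rest + 1 else 0

theorem pvLeadLoop_eq (l : List Char) (x : Int) : pvLeadLoop l x = x + pvCountLead l := by
  induction l generalizing x with
  | nil => simp [pvLeadLoop, pvCountLead]
  | cons c rest ih =>
    by_cases h : c = '1' <;> simp [pvLeadLoop, pvCountLead, h, ih]
    ring

theorem pvCountLead_le (l : List Char) : pvCountLead l ≤ l.length := by
  induction l with
  | nil => simp [pvCountLead]
  | cons c rest ih =>
    by_cases h : c = '1' <;> simp [pvCountLead, h]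
    omega

theorem pvCountLead_append (l : List Char) (c : Char) :
    pvCountLead (l ++ [c]) =
      if pvCountLead l = l.length then pvCountLead l + (if c = '1' then 1 else 0)
      else pvCountLead l := by
  induction l with
  | nil => by_cases h : c = '1' <;> simp [pvCountLead, h]
  | cons a rest ih =>
    by_cases h : a = '1'
    · have := pvCountLead_le rest
      by_cases h2 : pvCountLead rest = rest.length
      · simp [pvCountLead, h, ih, h2]
        omega
      · simp [pvCountLead, h, ih, h2]
    · simp [pvCountLead, h]

theorem log2_eq_of {m k : Nat} (hm : m ≠ 0) (h1 : 2 ^ k ≤ m) (h2 : m < 2 ^ (k + 1)) :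
    Nat.log2 m = k :=
  Nat.le_antisymm (Nat.lt_succ_iff.mp ((Nat.log2_lt hm).2 h2)) ((Nat.le_log2 hm).2 h1)

theorem pvBitLen_one : pvBitLen 1 = 1 := by
  have : Nat.log2 1 = 0 := log2_eq_of (by norm_num) (by norm_num) (by norm_num)
  simp [pvBitLen, this]

theorem pvBitLen_lt (n : Nat) (h : n ≠ 0) : n < 2 ^ pvBitLen n := by
  simpa [pvBitLen, h] using (Nat.lt_log2_self (n := n))

theorem pvBitLen_le_of_lt {m k : Nat} (h : m < 2 ^ k) : pvBitLen m ≤ k := by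
  by_cases hm : m = 0
  · simp [pvBitLen, hm]
  · simpa [pvBitLen, hm, Nat.succ_le_iff] using (Nat.log2_lt hm).2 h

theorem pvBitLen_ge {n k : Nat} (hn : n ≠ 0) (h : 2 ^ k ≤ n) : k + 1 ≤ pvBitLen n := by
  simpa [pvBitLen, hn, Nat.succ_le_succ_iff] using (Nat.le_log2 hn).2 h

theorem pvBitLen_two_mul_add (q r : Nat) (hq : 1 ≤ q) (hr : r ≤ 1) :
    pvBitLen (2 * q + r) = pvBitLen q + 1 := by
  have hq0 : q ≠ 0 := by omega
  have hn0 : 2 * q + r ≠ 0 := by omega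
  have hlow : 2 ^ (Nat.log2 q + 1) ≤ 2 * q + r := by
    have := Nat.log2_self_le hq0
    calc 2 ^ (Nat.log2 q + 1) = 2 * 2 ^ Nat.log2 q := by ring
    _ ≤ 2 * q := by omega
    _ ≤ 2 * q + r := by omega
  have hhigh : 2 * q + r < 2 ^ (Nat.log2 q + 1 + 1) := by
    have := Nat.lt_log2_self (n := q)
    calc 2 * q + r < 2 * (q + 1) := by omega
    _ ≤ 2 * 2 ^ (Nat.log2 q + 1) := by omega
    _ = 2 ^ (Nat.log2 q + 1 + 1) := by ring
  simp [pvBitLen, hq0, log2_eq_of hn0 hlow hhigh]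

theorem pvBinAux_length (n : Nat) : (pvBinAux n).length = pvBitLen n := by
  induction n using Nat.strong_induction_on with
  | _ n ih =>
    by_cases h0 : n = 0
    · rw [pvBinAux]; simp [h0, pvBitLen]
    · rcases Nat.lt_or_ge n 2 with h2 | h2
      · have hn : n = 1 := by omega
        subst hn
        have e1 : pvBinAux 1 = ['1'] := by
          rw [pvBinAux]; norm_num; rw [pvBinAux]; simp
        simp [e1, pvBitLen_one]
      · rw [pvBinAux]
        have hq : 1 ≤ n / 2 := by omega
        have hn : n = 2 * (n / 2) + n % 2 := by omega
        have hbl : pvBitLen n = pvBitLen (n / 2) + 1 := by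
          conv_lhs => rw [hn]
          exact pvBitLen_two_mul_add _ _ hq (by omega)
        simp [h0, ih (n / 2) (by omega), hbl]

/-- Key lemma: the count of leading ones of the binary digits of `n` is
    `bit_length n - bit_length (2^(bit_length n) - 1 - n)`. -/
theorem pvKey (n : Nat) (h : 1 ≤ n) :
    pvCountLead (pvBinAux n) = pvBitLen n - pvBitLen (2 ^ pvBitLen n - 1 - n) := by
  induction n using Nat.strong_induction_on with
  | _ n ih =>
    rcases Nat.lt_or_ge n 2 with h2 | h2
    · -- n = 1
      have hn : n = 1 := by omega
      subst hn
      have e1 : pvBinAux 1 = ['1'] := by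
        rw [pvBinAux]; norm_num; rw [pvBinAux]; simp
      have hb0 : pvBitLen 0 = 0 := by simp [pvBitLen]
      simp [e1, pvCountLead, pvBitLen_one, hb0]
    · -- n ≥ 2
      set q := n / 2 with hqdef
      set r := n % 2 with hrdef
      have hq : 1 ≤ q := by omega
      have hr : r ≤ 1 := by omega
      have hn : n = 2 * q + r := by omega
      have hq0 : q ≠ 0 := by omega
      have e : pvBinAux n = pvBinAux q ++ [if r = 1 then '1' else '0'] := by
        rw [pvBinAux]
        have : ¬ n = 0 := by omega
        simp [this, ← hqdef, ← hrdef]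
      have hbl : pvBitLen n = pvBitLen q + 1 := by
        rw [hn]; exact pvBitLen_two_mul_add q r hq hr
      have hlen : (pvBinAux q).length = pvBitLen q := pvBinAux_length q
      have hqlt : q < 2 ^ pvBitLen q := pvBitLen_lt q hq0
      have hm : 2 ^ pvBitLen n - 1 - n = 2 * (2 ^ pvBitLen q - 1 - q) + (1 - r) := by
        rw [hbl, hn, pow_succ]; omega
      have ihq := ih q (by omega) hq
      rw [e, pvCountLead_append, ihq, hlen, hm]
      have hb0 : pvBitLen 0 = 0 := by simp [pvBitLen]
      by_cases hm0 : 2 ^ pvBitLen q - 1 - q = 0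
      · -- the digits of q are all ones
        rcases Nat.lt_or_ge r 1 with hr0 | hr1
        · have hr' : r = 0 := by omega
          rw [hm0, hr']
          norm_num [hb0, pvBitLen_one, hbl]
          decide
        · have hr' : r = 1 := by omega
          rw [hm0, hr']
          norm_num [hb0, hbl]
      · -- some digit of q is zero: the appended digit does not matter
        have hblm : pvBitLen (2 * (2 ^ pvBitLen q - 1 - q) + (1 - r)) =
            pvBitLen (2 ^ pvBitLen q - 1 - q) + 1 :=
          pvBitLen_two_mul_add _ _ (by omega) (by omega)
        have hblm1 : 1 ≤ pvBitLen (2 ^ pvBitLen q - 1 - q) := by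
          have := pvBitLen_ge (k := 0) hm0 (by omega)
          omega
        have hblq1 : 1 ≤ pvBitLen q := pvBitLen_ge (k := 0) hq0 (by omega)
        have hne : ¬ pvBitLen q - pvBitLen (2 ^ pvBitLen q - 1 - q) = pvBitLen q := by
          omega
        rw [if_neg hne, hblm, hbl]
        omega

-- ===== VERDICT (by name: the statement is the Claim_ definition above) =====
theorem char_len_spec : Claim_equal_char_len := by
  intro byte _
  unfold Spec_char_len char_len char_len_alt
  have h36 : (3 <<< 6 : Int) = 192 := by decide
  rw [h36]
  by_cases hlt : byte < (192 : Int)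
  · simp [hlt]
  · have h192 : (192 : Int) ≤ byte := by
      simpa using not_lt.mp hlt
    have hn192 : 192 ≤ byte.toNat := by omega
    set n := byte.toNat with hndef
    have hbyte : byte = (n : Int) := by omega
    have hn0 : n ≠ 0 := by omega
    have hlen : (pvBinAux n).length = pvBitLen n := pvBinAux_length n
    have h8 : 8 ≤ pvBitLen n := by
      have : (2 : Nat) ^ 7 ≤ n := by norm_num; omega
      have := pvBitLen_ge hn0 this
      omega
    have hnotpad : ¬ (pvBinAux n).length < 8 := by omega
    have hnlt : n < 2 ^ pvBitLen n := pvBitLen_lt n hn0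
    have hble : pvBitLen (2 ^ pvBitLen n - 1 - n) ≤ pvBitLen n :=
      pvBitLen_le_of_lt (by omega)
    have hmcast : (((2 ^ pvBitLen n : Int) - 1) - byte).toNat = 2 ^ pvBitLen n - 1 - n := by
      rw [hbyte]
      have : ((2 ^ pvBitLen n : Int) - 1) - (n : Int) = ((2 ^ pvBitLen n - 1 - n : Nat) : Int) := by
        have h1 : 1 + n ≤ 2 ^ pvBitLen n := by omega
        rw [Nat.sub_sub, Nat.cast_sub h1]
        push_cast
        ring
      rw [this, Int.toNat_natCast]
    simp only [hlt, if_false, hnotpad, hmcast]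
    rw [pvLeadLoop_eq, pvKey n (by omega), zero_add, Nat.cast_sub hble]
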